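-- pv_equiv track=rewrite | github.com/nvrenuf/naughtycamspot | generate_blog.py | get_post_metadata
-- ===== SOURCE A (Python) =====
-- def get_post_metadata(md_content):
--     lines = md_content.split('\n')
--     title, date = "Untitled", ""
--     if lines[0].strip() == '---':
--         for i, line in enumerate(lines[1:], 1):
--             if line.strip() == '---':
--                 break
--             if line.startswith('title:'):
--                 title = line.split(':', 1)[1].strip().strip('"')
--             if line.startswith('date:'):
--                 date = line.split(':', 1)[1].strip().strip('"')
--     return title, date
-- ===== SOURCE B (Python) =====
-- def get_post_metadata(md_content):
--     lines = md_content.split('\n')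
--     if lines[0].strip() != '---':
--         return "Untitled", ""
--     end = next((i for i in range(1, len(lines)) if lines[i].strip() == '---'), len(lines))
--     block = lines[1:end]
--
--     def last_value(key, default):
--         vals = [ln.split(':', 1)[1].strip().strip('"') for ln in block if ln.startswith(key)]
--         return vals[-1] if vals else default
--
--     return last_value('title:', "Untitled"), last_value('date:', "")
-- ===== Notes on version B (the rewrite author's own statement) =====
-- stated objective: alternative
-- what changed: Instead of one stateful loop with a break and in-place reassignment, B first isolates the front-matter block (slice up to the next '---' line) and then, per key, takes the last match of a filtered comprehension over that block.
import Mathlib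
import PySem

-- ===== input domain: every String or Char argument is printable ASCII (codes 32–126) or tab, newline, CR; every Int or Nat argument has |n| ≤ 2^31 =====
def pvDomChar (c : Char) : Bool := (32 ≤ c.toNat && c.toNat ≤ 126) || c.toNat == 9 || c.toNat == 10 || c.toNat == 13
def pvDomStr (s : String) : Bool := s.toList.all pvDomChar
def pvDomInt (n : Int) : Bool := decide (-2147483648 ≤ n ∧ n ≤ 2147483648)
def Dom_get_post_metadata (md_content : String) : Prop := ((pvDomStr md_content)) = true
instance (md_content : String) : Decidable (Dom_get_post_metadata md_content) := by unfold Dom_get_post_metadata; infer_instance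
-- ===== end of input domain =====

-- B restructures A: instead of one stateful loop with a break, it slices the front-matter
-- block up to the next '---' line and takes the last match per key (alternative decomposition).

-- ===== PORT A =====
-- line.split(':', 1)[1].strip().strip('"')  (guarded by startswith, so index 1 exists; getD is exact there)
def pvVal (l : String) : String :=
  PySem.Str.stripChars (PySem.Str.strip (((PySem.Str.splitMax? l ":" 1).getD []).getD 1 "")) "\""

def pvA_loop : List String → String → String → String × String
  | [], t, d => (t, d)
  | l :: rest, t, d =>
    if PySem.Str.strip l = "---" then (t, d)
    else
      pvA_loop rest
        (if PySem.Str.startswith l "title:" then pvVal l else t)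
        (if PySem.Str.startswith l "date:" then pvVal l else d)

def get_post_metadata (md_content : String) : String × String :=
  let lines := (PySem.Str.split? md_content "\n").getD []
  if PySem.Str.strip (lines.getD 0 "") = "---" then pvA_loop lines.tail "Untitled" ""
  else ("Untitled", "")

-- ===== PORT B =====
-- vals[-1] if vals else default, over the filtered comprehension
def pvLastValue (block : List String) (key default_ : String) : String :=
  ((block.filterMap (fun ln =>
      if PySem.Str.startswith ln key then some (pvVal ln) else none)).getLast?).getD default_

def get_post_metadata_alt (md_content : String) : String × String :=
  let lines := (PySem.Str.split? md_content "\n").getD []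
  if PySem.Str.strip (lines.getD 0 "") ≠ "---" then ("Untitled", "")
  else
    -- next(i for i in range(1, len(lines)) if lines[i].strip() == '---') with default len(lines),
    -- then lines[1:end]: exactly findIdx on the tail followed by take
    let block := lines.tail.take (lines.tail.findIdx (fun l => PySem.Str.strip l == "---"))
    (pvLastValue block "title:" "Untitled", pvLastValue block "date:" "")

-- ===== PRECONDITION & SPEC =====
def Spec_get_post_metadata (md_content : String) (out : String × String) : Prop := out = get_post_metadata_alt md_content
instance (md_content : String) (out : String × String) : Decidable (Spec_get_post_metadata md_content out) := by unfold Spec_get_post_metadata; infer_instance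

-- ===== CLAIM (what is proved, stated in full; the proofs are below) =====
def Claim_equal_get_post_metadata : Prop := ∀ (md_content : String), Dom_get_post_metadata md_content → Spec_get_post_metadata md_content (get_post_metadata md_content)

-- ===== LEMMAS AND PROOFS =====
theorem pv_getLast?_cons_getD {α : Type} (a d : α) (xs : List α) :
    ((a :: xs).getLast?).getD d = (xs.getLast?).getD a := by
  cases h : xs.getLast? with
  | none => simp [List.getLast?_eq_none_iff.mp h]
  | some b => rw [List.getLast?_cons, h]; rfl

theorem pvLastValue_cons (l : String) (bs : List String) (key dflt : String) :
    pvLastValue (l :: bs) key dflt =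
      pvLastValue bs key (if PySem.Str.startswith l key then pvVal l else dflt) := by
  unfold pvLastValue
  rw [List.filterMap_cons]
  by_cases hs : PySem.Str.startswith l key
  · rw [if_pos hs, if_pos hs]
    exact pv_getLast?_cons_getD _ _ _
  · rw [if_neg hs, if_neg hs]

theorem pvA_loop_eq (ls : List String) : ∀ t d : String,
    pvA_loop ls t d =
      (pvLastValue (ls.take (ls.findIdx (fun l => PySem.Str.strip l == "---"))) "title:" t,
       pvLastValue (ls.take (ls.findIdx (fun l => PySem.Str.strip l == "---"))) "date:" d) := by
  induction ls with
  | nil => intro t d; simp [pvA_loop, pvLastValue]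
  | cons l rest ih =>
    intro t d
    by_cases h : PySem.Str.strip l = "---"
    · simp [pvA_loop, h, List.findIdx_cons, pvLastValue]
    · rw [pvA_loop]
      simp only [h, if_false]
      have hb : (PySem.Str.strip l == "---") = false := beq_eq_false_iff_ne.mpr h
      have hfi : List.findIdx (fun l => PySem.Str.strip l == "---") (l :: rest)
          = List.findIdx (fun l => PySem.Str.strip l == "---") rest + 1 := by
        rw [List.findIdx_cons, hb]; rfl
      rw [ih, hfi, List.take_succ_cons, pvLastValue_cons, pvLastValue_cons]

-- ===== VERDICT (by name: the statement is the Claim_ definition above) =====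
theorem get_post_metadata_spec : Claim_equal_get_post_metadata := by
  intro md _
  unfold Spec_get_post_metadata get_post_metadata get_post_metadata_alt
  by_cases h : PySem.Str.strip (((PySem.Str.split? md "\n").getD []).getD 0 "") = "---"
  · simp only [h, ne_eq, not_true_eq_false, if_true, if_false]
    exact pvA_loop_eq _ "Untitled" ""
  · simp only [h, ne_eq, not_false_eq_true, if_true, if_false]
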